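-- pv_equiv track=rewrite | github.com/marcbln/ai-code-comments | phpcomment/utils/patcher_v2.py | _hunk_to_before_after
-- ===== SOURCE A (Python) =====
-- def _hunk_to_before_after(hunk: str) -> tuple:
--     """
--     Extracts the 'before' and 'after' sections from a unified diff.
--
--     Args:
--         hunk (str): The unified diff content.
--
--     Returns:
--         tuple: A tuple containing the 'before' and 'after' text as strings.
--     """
--     before = []
--     after = []
--
--     for line in hunk.splitlines(keepends=True):
--         if line.startswith(" "):
--             before.append(line[1:])
--             after.append(line[1:])
--         elif line.startswith("-"):
--             before.append(line[1:])
--         elif line.startswith("+"):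
--             after.append(line[1:])
--
--     return "".join(before), "".join(after)
-- ===== SOURCE B (Python) =====
-- def _hunk_to_before_after(hunk: str) -> tuple:
--     lines = hunk.splitlines(keepends=True)
--     before = "".join(l[1:] for l in lines if l[:1] in (" ", "-"))
--     after = "".join(l[1:] for l in lines if l[:1] in (" ", "+"))
--     return before, after
-- ===== Notes on version B (the rewrite author's own statement) =====
-- stated objective: simpler
-- what changed: Replaced the single interleaved loop maintaining two accumulator lists by two independent filter-and-strip passes, one per output side.
import Mathlib
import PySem

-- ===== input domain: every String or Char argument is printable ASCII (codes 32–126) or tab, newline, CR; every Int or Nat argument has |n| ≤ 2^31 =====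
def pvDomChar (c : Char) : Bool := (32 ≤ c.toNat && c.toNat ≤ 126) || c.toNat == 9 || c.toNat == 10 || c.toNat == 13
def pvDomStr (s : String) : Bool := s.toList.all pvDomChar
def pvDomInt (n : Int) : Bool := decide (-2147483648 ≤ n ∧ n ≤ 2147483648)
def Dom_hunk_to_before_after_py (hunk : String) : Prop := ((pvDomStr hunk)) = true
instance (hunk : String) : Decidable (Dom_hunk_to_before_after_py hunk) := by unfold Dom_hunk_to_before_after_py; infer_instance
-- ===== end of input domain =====

-- B computes each side by its own filter-and-strip pass instead of A's single loop with two accumulators; same cost, plainer.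

-- shared helper: hunk.splitlines(keepends=True), ported by hand (PySem has no keepends variant).
-- Exact on the input domain: with only printable ASCII + tab/LF/CR present, Python's line breaks are exactly '\n', '\r', '\r\n'.
def splitlinesKeep (cur : List Char) : List Char → List (List Char)
  | [] => if cur.isEmpty then [] else [cur.reverse]
  | c :: rest =>
    if c = '\n' then (cur.reverse ++ ['\n']) :: splitlinesKeep [] rest
    else if c = '\r' then
      if rest.head? = some '\n' then (cur.reverse ++ ['\r', '\n']) :: splitlinesKeep [] rest.tail
      else (cur.reverse ++ ['\r']) :: splitlinesKeep [] rest
    else splitlinesKeep (c :: cur) rest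
termination_by l => l.length

-- ===== PORT A =====
-- loop body: the if/elif/elif chain appending line[1:] to before and/or after
def hunkStepA (st : List (List Char) × List (List Char)) (line : List Char) :
    List (List Char) × List (List Char) :=
  if PySem.Chars.startswith line [' '] then
    (st.1 ++ [PySem.Chars.slice line (some 1) none], st.2 ++ [PySem.Chars.slice line (some 1) none])
  else if PySem.Chars.startswith line ['-'] then
    (st.1 ++ [PySem.Chars.slice line (some 1) none], st.2)
  else if PySem.Chars.startswith line ['+'] then
    (st.1, st.2 ++ [PySem.Chars.slice line (some 1) none])
  else st

def hunk_to_before_after_py (hunk : String) : String × String :=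
  let lines := splitlinesKeep [] hunk.toList
  let st := lines.foldl hunkStepA ([], [])
  (String.ofList (PySem.Chars.join [] st.1), String.ofList (PySem.Chars.join [] st.2))

-- ===== PORT B =====
-- l[:1] in (" ", "-")  /  (" ", "+")
def hunkKeepBefore (l : List Char) : Bool :=
  PySem.Chars.slice l none (some 1) == [' '] || PySem.Chars.slice l none (some 1) == ['-']
def hunkKeepAfter (l : List Char) : Bool :=
  PySem.Chars.slice l none (some 1) == [' '] || PySem.Chars.slice l none (some 1) == ['+']

def hunk_to_before_after_py_alt (hunk : String) : String × String :=
  let lines := splitlinesKeep [] hunk.toList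
  let before := PySem.Chars.join []
    ((lines.filter hunkKeepBefore).map (fun l => PySem.Chars.slice l (some 1) none))
  let after := PySem.Chars.join []
    ((lines.filter hunkKeepAfter).map (fun l => PySem.Chars.slice l (some 1) none))
  (String.ofList before, String.ofList after)

-- ===== PRECONDITION & SPEC =====
def Spec_hunk_to_before_after_py (hunk : String) (out : String × String) : Prop := out = hunk_to_before_after_py_alt hunk
instance (hunk : String) (out : String × String) : Decidable (Spec_hunk_to_before_after_py hunk out) := by unfold Spec_hunk_to_before_after_py; infer_instance

-- ===== CLAIM (what is proved, stated in full; the proofs are below) =====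
def Claim_equal_hunk_to_before_after_py : Prop := ∀ (hunk : String), Dom_hunk_to_before_after_py hunk → Spec_hunk_to_before_after_py hunk (hunk_to_before_after_py hunk)

-- ===== LEMMAS AND PROOFS =====

theorem slice01 (l : List Char) : PySem.List.slice l none (some 1) = l.take 1 := by
  exact_mod_cast PySem.List.slice_to_natCast l 1

-- line.startswith(c) for one char equals the l[:1] == [c] test
theorem startswith_single (l : List Char) (c : Char) :
    PySem.Chars.startswith l [c] = (PySem.Chars.slice l none (some 1) == [c]) := by
  rw [Bool.eq_iff_iff]
  cases l with
  | nil => simp [PySem.Chars.startswith_iff, slice01]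
  | cons d t =>
    rw [PySem.Chars.slice_eq_listSlice, slice01]
    simp [PySem.Chars.startswith_iff, List.take_succ_cons, List.cons_prefix_cons]
    exact eq_comm

theorem foldA_spec (ls : List (List Char)) (b a : List (List Char)) :
    ls.foldl hunkStepA (b, a) =
      (b ++ (ls.filter hunkKeepBefore).map (fun l => PySem.Chars.slice l (some 1) none),
       a ++ (ls.filter hunkKeepAfter).map (fun l => PySem.Chars.slice l (some 1) none)) := by
  induction ls generalizing b a with
  | nil => simp
  | cons l ls ih =>
    have hsp := startswith_single l ' '
    have hm := startswith_single l '-'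
    have hp := startswith_single l '+'
    simp only [List.foldl_cons, hunkStepA, hsp, hm, hp, List.filter_cons,
      hunkKeepBefore, hunkKeepAfter, beq_iff_eq, PySem.Chars.slice_eq_listSlice]
    by_cases h1 : PySem.List.slice l none (some 1) = [' ']
    · simp [h1, ih]
    · by_cases h2 : PySem.List.slice l none (some 1) = ['-']
      · simp [h1, h2, ih]
      · by_cases h3 : PySem.List.slice l none (some 1) = ['+']
        · simp [h1, h2, h3, ih]
        · simp [h1, h2, h3, ih]

-- ===== VERDICT (by name: the statement is the Claim_ definition above) =====
theorem hunk_to_before_after_py_spec : Claim_equal_hunk_to_before_after_py := by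
  intro hunk _
  unfold Spec_hunk_to_before_after_py hunk_to_before_after_py hunk_to_before_after_py_alt
  simp [foldA_spec]
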